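-- pv_equiv track=rewrite | github.com/ahundt/autorun | plugins/autorun/src/autorun/command_detection.py | _extract_from_tokens
-- ===== SOURCE A (Python) =====
-- from typing import Final
--
-- COMMAND_PREFIXES: Final[frozenset[str]] = frozenset({
--     # Privilege escalation
--     "sudo", "su", "doas", "pkexec", "gksudo", "kdesudo",
--     # Environment modification
--     "env", "nice", "nohup", "time", "timeout", "ionice",
--     # Debugging/tracing
--     "strace", "ltrace", "watch",
--     # Sandboxing
--     "chroot", "fakeroot", "firejail", "bubblewrap",
-- })
--
-- def _get_basename(path: str) -> str:
--     """Extract basename: /bin/rm -> rm. Inlined for hot path."""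
--     idx = path.rfind("/")
--     return path[idx + 1:] if idx >= 0 else path
--
-- def _extract_from_tokens(tokens: list[str]) -> tuple[str | None, str | None, set[str]]:
--     """
--     v8: Extract with end-of-options (--) handling and multi-pass detection.
--
--     Returns (primary_command, full_string, all_potential_commands).
--
--     Logic for all_potential:
--     - If first command is a prefix (sudo, env), ALL subsequent non-flag tokens
--       are potential commands (multi-pass detection for "sudo -u root rm")
--     - If first command is NOT a prefix, only that command is in potential
--       (prevents false positives like "echo rm" blocking rm)
--     - Exception: -- marker resets, tokens after it are included
--
--     Examples:
--     - "sudo -u root rm file" -> potential={root, rm, file} (multi-pass, rm will match)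
--     - "echo rm" -> potential={echo} (echo is not a prefix, so rm is just an arg)
--     - "cat && rm file" -> handled by _extract_recursive, each segment separately
--     """
--     if not tokens:
--         return None, None, set()
--
--     potential: set[str] = set()
--     cmd_idx: int | None = None
--     end_of_opts = False
--     saw_prefix = False  # Did we see a prefix command? If so, enable multi-pass
--
--     for i, token in enumerate(tokens):
--         # v8: Handle -- end-of-options marker
--         if token == "--":
--             end_of_opts = True
--             continue
--         # Skip flags only before --
--         if not end_of_opts and token.startswith("-"):
--             continue
--
--         basename = _get_basename(token)
--
--         if cmd_idx is None:
--             # Looking for the primary command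
--             if basename in COMMAND_PREFIXES:
--                 saw_prefix = True
--                 continue
--             # Found a non-prefix token - this is a potential command
--             cmd_idx = i
--             potential.add(basename)
--         elif saw_prefix:
--             # Multi-pass mode: we saw a prefix, so all subsequent non-flag tokens
--             # are potential commands (handles "sudo -u root rm file")
--             potential.add(basename)
--         elif end_of_opts:
--             # After --, tokens could be filenames that match command patterns
--             potential.add(basename)
--         # else: regular command without prefix, don't add arguments to potential
--
--     if cmd_idx is None:
--         return None, None, set()
--
--     cmd_name = _get_basename(tokens[cmd_idx])
--     # v8: Build command string more efficiently
--     rest = tokens[cmd_idx + 1:]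
--     cmd_string = f"{cmd_name} {' '.join(rest)}" if rest else cmd_name
--     return cmd_name, cmd_string, potential
-- ===== SOURCE B (Python) =====
-- COMMAND_PREFIXES = frozenset({
--     "sudo", "su", "doas", "pkexec", "gksudo", "kdesudo",
--     "env", "nice", "nohup", "time", "timeout", "ionice",
--     "strace", "ltrace", "watch",
--     "chroot", "fakeroot", "firejail", "bubblewrap",
-- })
--
-- def _extract_from_tokens(tokens):
--     # Pass 1: collect the relevant tokens as (index, basename, after_double_dash).
--     rel = []
--     end_of_opts = False
--     for i, tok in enumerate(tokens):
--         if tok == "--":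
--             end_of_opts = True
--         elif end_of_opts or not tok.startswith("-"):
--             rel.append((i, tok[tok.rfind("/") + 1:], end_of_opts))
--     # Pass 2: the primary command is the first relevant non-prefix token.
--     k = 0
--     while k < len(rel) and rel[k][1] in COMMAND_PREFIXES:
--         k += 1
--     if k == len(rel):
--         return None, None, set()
--     cmd_idx, cmd_name, _ = rel[k]
--     after = rel[k + 1:]
--     if k > 0:  # a leading prefix enables multi-pass: every later relevant token
--         extra = [b for _, b, _ in after]
--     else:      # otherwise only tokens after the -- marker
--         extra = [b for _, b, f in after if f]
--     potential = set([cmd_name] + extra)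
--     cmd_string = " ".join([cmd_name] + tokens[cmd_idx + 1:])
--     return cmd_name, cmd_string, potential
-- ===== Notes on version B (the rewrite author's own statement) =====
-- stated objective: alternative
-- what changed: Replaces A's single fused stateful loop (cmd_idx/end_of_opts/saw_prefix juggled together) by two separate passes: one scan collecting the relevant tokens as (index, basename, after--) triples, then a split at the first non-prefix triple from which the command, the multi-pass decision and the candidate set are computed declaratively.
import Mathlib
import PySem

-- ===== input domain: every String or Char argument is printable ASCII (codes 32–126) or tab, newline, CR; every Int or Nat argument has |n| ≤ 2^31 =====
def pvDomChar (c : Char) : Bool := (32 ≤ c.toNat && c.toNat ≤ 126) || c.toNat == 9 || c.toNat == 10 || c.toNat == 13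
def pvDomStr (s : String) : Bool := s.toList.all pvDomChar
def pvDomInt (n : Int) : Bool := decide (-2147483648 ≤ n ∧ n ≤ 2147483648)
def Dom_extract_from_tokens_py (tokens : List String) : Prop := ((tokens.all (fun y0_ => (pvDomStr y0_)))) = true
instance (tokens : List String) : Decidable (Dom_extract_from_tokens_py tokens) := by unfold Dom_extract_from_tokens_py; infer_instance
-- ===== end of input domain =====

-- B replaces A's single fused stateful loop by a relevant-token collecting pass followed by a
-- split at the first non-prefix entry (a different decomposition; no speed claim).

-- ===== PORT A =====

def pvPrefixes : List String :=
  ["sudo", "su", "doas", "pkexec", "gksudo", "kdesudo",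
   "env", "nice", "nohup", "time", "timeout", "ionice",
   "strace", "ltrace", "watch",
   "chroot", "fakeroot", "firejail", "bubblewrap"]

-- A's _get_basename: idx = path.rfind("/"); path[idx+1:] if idx >= 0 else path
def pvBasenameA (path : String) : String :=
  let idx := PySem.Str.rfind path "/"
  if 0 ≤ idx then PySem.Str.slice path (some (idx + 1)) none else path

-- A's for-loop; state = (potential, cmd_idx, end_of_opts, saw_prefix), i the running index
def pvLoopA : List String → Nat → (PySem.Set String × Option Nat × Bool × Bool) →
    (PySem.Set String × Option Nat × Bool × Bool)
  | [], _, st => st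
  | t :: ts, i, (pot, ci, eoo, sp) =>
    if t == "--" then pvLoopA ts (i + 1) (pot, ci, true, sp)
    else if !eoo && PySem.Str.startswith t "-" then pvLoopA ts (i + 1) (pot, ci, eoo, sp)
    else
      let b := pvBasenameA t
      match ci with
      | none =>
        if pvPrefixes.contains b then pvLoopA ts (i + 1) (pot, none, eoo, true)
        else pvLoopA ts (i + 1) (PySem.Set.add pot b, some i, eoo, sp)
      | some j =>
        if sp then pvLoopA ts (i + 1) (PySem.Set.add pot b, some j, eoo, sp)
        else if eoo then pvLoopA ts (i + 1) (PySem.Set.add pot b, some j, eoo, sp)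
        else pvLoopA ts (i + 1) (pot, some j, eoo, sp)

def extract_from_tokens_py (tokens : List String) : Option String × Option String × List String :=
  if tokens.isEmpty then (none, none, [])
  else
    match pvLoopA tokens 0 (PySem.Set.empty, none, false, false) with
    | (_, none, _, _) => (none, none, [])
    | (pot, some i, _, _) =>
      let cmd_name := pvBasenameA (PySem.List.pyGetD tokens (i : Int) "")
      let rest := PySem.List.slice tokens (some ((i : Int) + 1)) none
      let cmd_string :=
        if rest.isEmpty then cmd_name
        else PySem.Str.join " " [cmd_name, PySem.Str.join " " rest]  -- f"{cmd_name} {' '.join(rest)}"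
      (some cmd_name, some cmd_string, pot)

-- ===== PORT B =====

-- B's basename: tok[tok.rfind("/") + 1:]
def pvBasenameB (path : String) : String :=
  PySem.Str.slice path (some (PySem.Str.rfind path "/" + 1)) none

-- B's pass 1: relevant tokens as (index, basename, end_of_opts-at-that-point)
def pvRelB : List String → Nat → Bool → List (Nat × String × Bool)
  | [], _, _ => []
  | t :: ts, i, eoo =>
    if t == "--" then pvRelB ts (i + 1) true
    else if eoo || !PySem.Str.startswith t "-" then (i, pvBasenameB t, eoo) :: pvRelB ts (i + 1) eoo
    else pvRelB ts (i + 1) eoo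

-- B's pass-2 while-loop: drop leading prefix entries; the Bool records whether any was dropped (k > 0)
def pvDropB : List (Nat × String × Bool) → (List (Nat × String × Bool) × Bool)
  | [] => ([], false)
  | r :: rs =>
    if pvPrefixes.contains r.2.1 then ((pvDropB rs).1, true) else (r :: rs, false)

def extract_from_tokens_py_alt (tokens : List String) : Option String × Option String × List String :=
  match pvDropB (pvRelB tokens 0 false) with
  | ([], _) => (none, none, [])
  | ((cmd_idx, cmd_name, _) :: after, saw) =>
    let extra := if saw then after.map (·.2.1) else (after.filter (·.2.2)).map (·.2.1)
    let potential := PySem.Set.ofList (cmd_name :: extra)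
    let cmd_string := PySem.Str.join " " (cmd_name :: PySem.List.slice tokens (some ((cmd_idx : Int) + 1)) none)
    (some cmd_name, some cmd_string, potential)

-- ===== PRECONDITION & SPEC =====
def Spec_extract_from_tokens_py (tokens : List String) (out : Option String × Option String × List String) : Prop := out = extract_from_tokens_py_alt tokens
instance (tokens : List String) (out : Option String × Option String × List String) : Decidable (Spec_extract_from_tokens_py tokens out) := by unfold Spec_extract_from_tokens_py; infer_instance

-- ===== CLAIM (what is proved, stated in full; the proofs are below) =====
def Claim_equal_extract_from_tokens_py : Prop := ∀ (tokens : List String), Dom_extract_from_tokens_py tokens → Spec_extract_from_tokens_py tokens (extract_from_tokens_py tokens)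

-- ===== LEMMAS AND PROOFS =====

theorem pv_neg_one_le_rfind (s sub : List Char) : -1 ≤ PySem.Chars.rfind s sub := by
  unfold PySem.Chars.rfind
  generalize s.length = n
  induction n with
  | zero => simp [PySem.Chars.rfind.go]; split_ifs <;> omega
  | succ k ih =>
    rw [show PySem.Chars.rfind.go s sub (k+1) =
        (if sub.isPrefixOf (List.drop (k + 1) s) = true then ((k:Int) + 1) else PySem.Chars.rfind.go s sub k) from rfl]
    split_ifs <;> [omega; exact ih]

theorem pvBasename_eq (s : String) : pvBasenameA s = pvBasenameB s := by
  unfold pvBasenameA pvBasenameB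
  dsimp only
  split_ifs with h
  · rfl
  · have h1 : PySem.Str.rfind s "/" = -1 := by
      have := pv_neg_one_le_rfind s.toList "/".toList
      simp [PySem.Str.rfind_eq] at *
      omega
    rw [h1]
    apply String.toList_inj.mp
    simp [PySem.Str.toList_slice]

def pvEoo (ts : List String) (eoo : Bool) : Bool := eoo || ts.contains "--"

theorem pvLoopA_phase2 (ts : List String) (i : Nat) (pot : PySem.Set String) (j : Nat)
    (eoo sp : Bool) :
    pvLoopA ts i (pot, some j, eoo, sp) =
      ((if sp then (pvRelB ts i eoo).map (·.2.1)
        else ((pvRelB ts i eoo).filter (·.2.2)).map (·.2.1)).foldl PySem.Set.add pot,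
       some j, pvEoo ts eoo, sp) := by
  induction ts generalizing i pot eoo with
  | nil => simp [pvLoopA, pvRelB, pvEoo]
  | cons t ts ih =>
    by_cases h1 : t = "--"
    · subst h1
      cases eoo <;> cases sp <;>
        simp [pvLoopA, pvRelB, pvEoo, ih]
    · have h1' : ¬ ("--" = t) := fun h => h1 h.symm
      by_cases h2 : PySem.Chars.startswith t.toList ['-'] = true <;>
        cases eoo <;> cases sp <;>
          simp [pvLoopA, pvRelB, pvEoo, h1, h1', h2, ih, pvBasename_eq]


theorem pvLoopA_phase1 (ts : List String) (i : Nat) (eoo sp : Bool) :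
    pvLoopA ts i (PySem.Set.empty, none, eoo, sp) =
      match pvDropB (pvRelB ts i eoo) with
      | ([], saw) => (PySem.Set.empty, none, pvEoo ts eoo, sp || saw)
      | ((j, b, _) :: after, saw) =>
        (PySem.Set.ofList (b :: (if sp || saw then after.map (·.2.1)
            else (after.filter (·.2.2)).map (·.2.1))),
         some j, pvEoo ts eoo, sp || saw) := by
  induction ts generalizing i eoo sp with
  | nil => simp [pvLoopA, pvRelB, pvDropB, pvEoo]
  | cons t ts ih =>
    by_cases h1 : t = "--"
    · subst h1
      have := ih (i + 1) true sp
      rcases hd : pvDropB (pvRelB ts (i + 1) true) with ⟨rest, saw⟩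
      cases rest <;>
        · rw [hd] at this
          cases eoo <;>
            simp_all [pvLoopA, pvRelB, pvEoo, hd]
    · have h1' : ¬ ("--" = t) := fun h => h1 h.symm
      by_cases h2 : PySem.Chars.startswith t.toList ['-'] = true
      · cases eoo
        · -- flag skipped
          have := ih (i + 1) false sp
          rcases hd : pvDropB (pvRelB ts (i + 1) false) with ⟨rest, saw⟩
          cases rest <;>
            · rw [hd] at this
              simp_all [pvLoopA, pvRelB, pvEoo, hd]
        · -- relevant (after --)
          by_cases h3 : pvPrefixes.contains (pvBasenameB t) = true
          · have := ih (i + 1) true true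
            rcases hd : pvDropB (pvRelB ts (i + 1) true) with ⟨rest, saw⟩
            cases rest <;>
              · rw [hd] at this
                simp_all [pvLoopA, pvRelB, pvDropB, pvEoo, pvBasename_eq, hd]
          · have hp2 := pvLoopA_phase2 ts (i + 1) (PySem.Set.add PySem.Set.empty (pvBasenameA t)) i true sp
            simp_all [pvLoopA, pvRelB, pvDropB, pvEoo, pvBasename_eq,
              PySem.Set.ofList_eq_foldl, List.foldl_cons]
      · by_cases h3 : pvPrefixes.contains (pvBasenameB t) = true
        · have := ih (i + 1) eoo true
          rcases hd : pvDropB (pvRelB ts (i + 1) eoo) with ⟨rest, saw⟩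
          cases rest <;>
            · rw [hd] at this
              cases eoo <;> cases sp <;>
                simp_all [pvLoopA, pvRelB, pvDropB, pvEoo, pvBasename_eq, hd]
        · have hp2 := pvLoopA_phase2 ts (i + 1) (PySem.Set.add PySem.Set.empty (pvBasenameA t)) i eoo sp
          cases eoo <;>
            simp_all [pvLoopA, pvRelB, pvDropB, pvEoo, pvBasename_eq,
              PySem.Set.ofList_eq_foldl, List.foldl_cons]

theorem pvRelB_mem (ts : List String) (i : Nat) (eoo : Bool) (j : Nat) (b : String) (f : Bool)
    (h : (j, b, f) ∈ pvRelB ts i eoo) :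
    i ≤ j ∧ j - i < ts.length ∧ b = pvBasenameB (ts.getD (j - i) "") := by
  induction ts generalizing i eoo with
  | nil => simp [pvRelB] at h
  | cons t ts ih =>
    simp only [pvRelB] at h
    split_ifs at h with h1 h2
    · have := ih (i + 1) true h
      refine ⟨by omega, by simp; omega, ?_⟩
      have hj : j - i = (j - (i+1)) + 1 := by omega
      rw [hj]; simpa using this.2.2
    · rcases List.mem_cons.mp h with he | hm
      · have hj : j = i ∧ b = pvBasenameB t := by
          constructor
          · exact congrArg Prod.fst he
          · exact congrArg (fun p => p.2.1) he
        obtain ⟨rfl, rfl⟩ := hj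
        exact ⟨le_refl _, by simp, by simp⟩
      · have := ih (i + 1) eoo hm
        refine ⟨by omega, by simp; omega, ?_⟩
        have hj : j - i = (j - (i+1)) + 1 := by omega
        rw [hj]; simpa using this.2.2
    · have := ih (i + 1) eoo h
      refine ⟨by omega, by simp; omega, ?_⟩
      have hj : j - i = (j - (i+1)) + 1 := by omega
      rw [hj]; simpa using this.2.2

theorem pvDropB_subset (l : List (Nat × String × Bool)) : ∀ x ∈ (pvDropB l).1, x ∈ l := by
  induction l with
  | nil => simp [pvDropB]
  | cons r rs ih =>
    intro x hx
    simp only [pvDropB] at hx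
    split_ifs at hx with h
    · exact List.mem_cons_of_mem _ (ih x hx)
    · exact hx

theorem pvJoin_eq (c : String) (l : List String) :
    (if l.isEmpty then c else PySem.Str.join " " [c, PySem.Str.join " " l]) =
    PySem.Str.join " " (c :: l) := by
  cases l with
  | nil =>
    rw [if_pos (show ([] : List String).isEmpty = true from rfl)]
    apply String.toList_inj.mp
    simp [PySem.Str.toList_join, PySem.Chars.join_singleton]
  | cons x xs =>
    rw [if_neg (by simp)]
    apply String.toList_inj.mp
    simp [PySem.Str.toList_join, PySem.Chars.join_cons_cons, PySem.Chars.join_singleton]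

theorem pvMain (tokens : List String) :
    extract_from_tokens_py tokens = extract_from_tokens_py_alt tokens := by
  unfold extract_from_tokens_py extract_from_tokens_py_alt
  cases tokens with
  | nil => rfl
  | cons t ts =>
    rw [if_neg (by simp)]
    rw [pvLoopA_phase1 (t :: ts) 0 false false]
    rcases hd : pvDropB (pvRelB (t :: ts) 0 false) with ⟨rest, saw⟩
    cases rest with
    | nil => simp
    | cons r after =>
      obtain ⟨j, b, f⟩ := r
      have hmem : (j, b, f) ∈ pvRelB (t :: ts) 0 false := by
        apply pvDropB_subset
        rw [hd]
        exact List.mem_cons_self ..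
      have hb := pvRelB_mem (t :: ts) 0 false j b f hmem
      have hcmd : pvBasenameA (PySem.List.pyGetD (t :: ts) (j : Int) "") = b := by
        rw [pvBasename_eq, PySem.List.pyGetD_natCast]
        have := hb.2.2
        simpa using this.symm
      simp only [hcmd, Bool.false_or, pvJoin_eq]

-- ===== VERDICT (by name: the statement is the Claim_ definition above) =====
theorem extract_from_tokens_py_spec : Claim_equal_extract_from_tokens_py := by
  intro tokens _
  unfold Spec_extract_from_tokens_py
  exact pvMain tokens
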